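-- pv_equiv track=rewrite | github.com/withered-flowers/apps-hackathon-project-adk | backend/app/mcp/markdown_generator.py | _generate_chat_summary
-- ===== SOURCE A (Python) =====
-- from typing import Any
--
-- def _generate_chat_summary(transcript: list[dict[str, Any]]) -> str:
--     """Generate a markdown summary of the conversation history."""
--     if not transcript:
--         return "*No conversation history available.*"
--
--     lines = [
--         "## Conversation Summary",
--         "",
--         f"**Total Messages**: {len(transcript)}",
--         "",
--     ]
--
--     user_messages = [m for m in transcript if m.get("role") == "user"]
--     assistant_messages = [m for m in transcript if m.get("role") == "assistant"]
--
--     lines.append(f"**User Messages**: {len(user_messages)}")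
--     lines.append(f"**Assistant Messages**: {len(assistant_messages)}")
--     lines.append("")
--
--     agents_used = set()
--     for msg in transcript:
--         if msg.get("agent"):
--             agents_used.add(msg["agent"])
--
--     if agents_used:
--         lines.append("**Agents Involved**:")
--         for agent in sorted(agents_used):
--             lines.append(f"- {agent}")
--         lines.append("")
--
--     lines.append("### Conversation Timeline")
--     lines.append("")
--
--     for msg in transcript:
--         role = msg.get("role", "unknown").capitalize()
--         agent = msg.get("agent", "")
--         content = msg.get("content", "")
--         timestamp = msg.get("timestamp", "")
--
--         prefix = f"**{role}** ({agent})" if agent else f"**{role}**"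
--         if timestamp:
--             prefix += f" — *{timestamp}*"
--
--         lines.append(prefix)
--         lines.append(f": {content}")
--         lines.append("")
--
--     return "\n".join(lines)
-- ===== SOURCE B (Python) =====
-- def _generate_chat_summary(transcript):
--     """Generate a markdown summary of the conversation history (single pass)."""
--     if not transcript:
--         return "*No conversation history available.*"
--
--     user_count = 0
--     assistant_count = 0
--     agents_used = set()
--     timeline = []
--
--     for msg in transcript:
--         role = msg.get("role", "unknown")
--         if role == "user":
--             user_count += 1
--         elif role == "assistant":
--             assistant_count += 1
--
--         agent = msg.get("agent", "")
--         if agent: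
--             agents_used.add(agent)
--
--         prefix = f"**{role.capitalize()}** ({agent})" if agent else f"**{role.capitalize()}**"
--         timestamp = msg.get("timestamp", "")
--         if timestamp:
--             prefix += f" — *{timestamp}*"
--         timeline.extend([prefix, f": {msg.get('content', '')}", ""])
--
--     lines = [
--         "## Conversation Summary",
--         "",
--         f"**Total Messages**: {len(transcript)}",
--         "",
--         f"**User Messages**: {user_count}",
--         f"**Assistant Messages**: {assistant_count}",
--         "",
--     ]
--     if agents_used:
--         lines.append("**Agents Involved**:")
--         lines.extend(f"- {agent}" for agent in sorted(agents_used))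
--         lines.append("")
--     lines.append("### Conversation Timeline")
--     lines.append("")
--     lines.extend(timeline)
--
--     return "\n".join(lines)
-- ===== Notes on version B (the rewrite author's own statement) =====
-- stated objective: simpler
-- what changed: B replaces A's four separate passes over the transcript (two filtering count passes, an agent-set loop, and the timeline loop) with one single pass accumulating user/assistant counts, the agent set and the timeline fragments together, then assembles the markdown once.
import Mathlib
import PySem

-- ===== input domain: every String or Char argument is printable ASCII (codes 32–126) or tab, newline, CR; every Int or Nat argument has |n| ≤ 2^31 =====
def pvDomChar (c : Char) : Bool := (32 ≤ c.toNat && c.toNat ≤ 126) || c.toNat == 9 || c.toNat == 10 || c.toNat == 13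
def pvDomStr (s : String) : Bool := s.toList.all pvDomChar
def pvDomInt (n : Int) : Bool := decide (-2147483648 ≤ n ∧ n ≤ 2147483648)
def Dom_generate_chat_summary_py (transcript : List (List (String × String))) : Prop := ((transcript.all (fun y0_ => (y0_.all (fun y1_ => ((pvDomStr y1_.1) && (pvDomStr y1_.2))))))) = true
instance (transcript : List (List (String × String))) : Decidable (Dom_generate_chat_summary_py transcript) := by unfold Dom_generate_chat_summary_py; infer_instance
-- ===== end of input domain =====

-- B merges A's four sequential passes over the transcript (two count filters, the agent-set
-- loop, the timeline loop) into ONE pass with a tuple accumulator, then assembles the same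
-- markdown; objective: simpler single-pass decomposition, same output.

-- shared model of Python's str.capitalize() (first char upper-cased, rest lower-cased; exact on ASCII)
def pyCap (s : String) : String :=
  match s.toList with
  | [] => ""
  | c :: cs => String.ofList (PySem.Chars.upperChar c :: PySem.Chars.lower cs)

-- msg.get(k, d) on the message dict
def mGetD (m : List (String × String)) (k d : String) : String :=
  (PySem.Dict.ofList m).getD k d

-- ===== PORT A =====
-- the timeline entry A appends for one message (prefix line, content line, blank line)
def pvFrag (msg : List (String × String)) : List String :=
  let role := pyCap (mGetD msg "role" "unknown")
  let agent := mGetD msg "agent" ""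
  let content := mGetD msg "content" ""
  let timestamp := mGetD msg "timestamp" ""
  let pre := if agent ≠ "" then "**" ++ role ++ "** (" ++ agent ++ ")" else "**" ++ role ++ "**"
  let pre := if timestamp ≠ "" then pre ++ " — *" ++ timestamp ++ "*" else pre
  [pre, ": " ++ content, ""]

def generate_chat_summary_py (transcript : List (List (String × String))) : String :=
  if transcript = [] then "*No conversation history available.*"
  else
    let lines : List String :=
      ["## Conversation Summary", "",
       "**Total Messages**: " ++ PySem.Int.toStr transcript.length, ""]
    let user_messages := transcript.filter (fun m => (PySem.Dict.ofList m).get? "role" == some "user")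
    let assistant_messages := transcript.filter (fun m => (PySem.Dict.ofList m).get? "role" == some "assistant")
    let lines := lines ++ ["**User Messages**: " ++ PySem.Int.toStr user_messages.length,
                           "**Assistant Messages**: " ++ PySem.Int.toStr assistant_messages.length, ""]
    let agents_used : PySem.Set String :=
      transcript.foldl (fun s msg =>
        if mGetD msg "agent" "" ≠ "" then PySem.Set.add s (mGetD msg "agent" "") else s) PySem.Set.empty
    let lines :=
      if agents_used ≠ [] then
        ((PySem.List.sorted agents_used (fun x => x) false).foldl
          (fun ls a => ls ++ ["- " ++ a]) (lines ++ ["**Agents Involved**:"])) ++ [""]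
      else lines
    let lines := lines ++ ["### Conversation Timeline", ""]
    let lines := transcript.foldl (fun ls msg => ls ++ pvFrag msg) lines
    PySem.Str.join "\n" lines

-- ===== PORT B =====
-- one step of B's single pass: update (user_count, assistant_count, agents_used, timeline)
def pvStep (st : Int × Int × PySem.Set String × List String) (msg : List (String × String)) :
    Int × Int × PySem.Set String × List String :=
  let (u, a, ag, tl) := st
  let role := mGetD msg "role" "unknown"
  let u := if role = "user" then u + 1 else u
  let a := if role ≠ "user" ∧ role = "assistant" then a + 1 else a
  let agent := mGetD msg "agent" ""
  let ag := if agent ≠ "" then PySem.Set.add ag agent else ag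
  let pre := if agent ≠ "" then "**" ++ pyCap role ++ "** (" ++ agent ++ ")" else "**" ++ pyCap role ++ "**"
  let timestamp := mGetD msg "timestamp" ""
  let pre := if timestamp ≠ "" then pre ++ " — *" ++ timestamp ++ "*" else pre
  (u, a, ag, tl ++ [pre, ": " ++ mGetD msg "content" "", ""])

def generate_chat_summary_py_alt (transcript : List (List (String × String))) : String :=
  if transcript = [] then "*No conversation history available.*"
  else
    let st := transcript.foldl pvStep (0, 0, PySem.Set.empty, [])
    let lines : List String :=
      ["## Conversation Summary", "",
       "**Total Messages**: " ++ PySem.Int.toStr transcript.length, "",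
       "**User Messages**: " ++ PySem.Int.toStr st.1,
       "**Assistant Messages**: " ++ PySem.Int.toStr st.2.1, ""]
    let lines := lines ++
      (if st.2.2.1 ≠ [] then
        "**Agents Involved**:" ::
          ((PySem.List.sorted st.2.2.1 (fun x => x) false).map (fun a => "- " ++ a)) ++ [""]
       else [])
    let lines := lines ++ ["### Conversation Timeline", ""] ++ st.2.2.2
    PySem.Str.join "\n" lines

-- ===== PRECONDITION & SPEC =====
def Spec_generate_chat_summary_py (transcript : List (List (String × String))) (out : String) : Prop := out = generate_chat_summary_py_alt transcript
instance (transcript : List (List (String × String))) (out : String) : Decidable (Spec_generate_chat_summary_py transcript out) := by unfold Spec_generate_chat_summary_py; infer_instance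

-- ===== CLAIM (what is proved, stated in full; the proofs are below) =====
def Claim_equal_generate_chat_summary_py : Prop := ∀ (transcript : List (List (String × String))), Dom_generate_chat_summary_py transcript → Spec_generate_chat_summary_py transcript (generate_chat_summary_py transcript)

-- ===== LEMMAS AND PROOFS =====

-- the agent a message contributes, if any
def pvAgent? (msg : List (String × String)) : Option String :=
  if mGetD msg "agent" "" ≠ "" then some (mGetD msg "agent" "") else none

def pvIsRole (r : String) (m : List (String × String)) : Bool :=
  (PySem.Dict.ofList m).get? "role" == some r

-- B's fold, characterised against A's four independent passes
theorem pvStep_foldl (t : List (List (String × String)))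
    (u a : Int) (ag : PySem.Set String) (tl : List String) :
    t.foldl pvStep (u, a, ag, tl) =
      (u + ((t.filter (pvIsRole "user")).length : Int),
       a + ((t.filter (pvIsRole "assistant")).length : Int),
       PySem.Set.update ag (t.filterMap pvAgent?),
       tl ++ t.flatMap pvFrag) := by
  induction t generalizing u a ag tl with
  | nil => simp [PySem.Set.update]
  | cons m t ih =>
    simp only [List.foldl_cons, pvStep]
    rw [ih]
    have hrole : ∀ r : String, r ≠ "unknown" →
        ((mGetD m "role" "unknown" = r) ↔ pvIsRole r m = true) := by
      intro r hr
      simp only [pvIsRole, mGetD, PySem.Dict.getD]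
      cases h : (PySem.Dict.ofList m).get? "role" with
      | none =>
        simp only [Option.getD, beq_iff_eq, reduceCtorEq, iff_false]
        exact fun h' => hr h'.symm
      | some v => simp [Option.getD]
    simp only [Prod.mk.injEq]
    refine ⟨?_, ?_, ?_, ?_⟩
    · -- user count component
      have hu := hrole "user" (by decide)
      simp only [hu]
      by_cases hb : pvIsRole "user" m = true <;>
        simp [hb] <;> omega
    · -- assistant count component
      have ha := hrole "assistant" (by decide)
      have hcond : (mGetD m "role" "unknown" ≠ "user" ∧ mGetD m "role" "unknown" = "assistant")
          ↔ pvIsRole "assistant" m = true := by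
        rw [← ha]
        exact ⟨And.right, fun h => ⟨by rw [h]; decide, h⟩⟩
      simp only [hcond]
      by_cases hb : pvIsRole "assistant" m = true <;>
        simp [hb] <;> omega
    · -- agents component
      by_cases h : mGetD m "agent" "" = "" <;>
        simp [h, pvAgent?, PySem.Set.update]
    · -- timeline component
      by_cases h : mGetD m "agent" "" = "" <;>
      by_cases h2 : mGetD m "timestamp" "" = "" <;>
        simp [h, h2, pvFrag]

-- A's conditional-add fold over the transcript is Set.update with the extracted agent list
theorem pvAgents_foldl (t : List (List (String × String))) (s : PySem.Set String) :
    t.foldl (fun s msg =>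
      if mGetD msg "agent" "" ≠ "" then PySem.Set.add s (mGetD msg "agent" "") else s) s =
    PySem.Set.update s (t.filterMap pvAgent?) := by
  induction t generalizing s with
  | nil => simp [PySem.Set.update]
  | cons m t ih =>
    simp only [List.foldl_cons]
    rw [ih]
    by_cases h : mGetD m "agent" "" = "" <;>
      simp [h, pvAgent?, PySem.Set.update]

theorem pvAppend_foldl_flatMap (t : List (List (String × String))) (init : List String) :
    t.foldl (fun ls msg => ls ++ pvFrag msg) init = init ++ t.flatMap pvFrag := by
  induction t generalizing init with
  | nil => simp
  | cons m t ih => simp [ih]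

theorem pvFlatten_map_singleton {α β : Type} (f : α → β) (xs : List α) :
    (xs.map (fun x => [f x])).flatten = xs.map f := by
  induction xs with
  | nil => rfl
  | cons x xs ih => simp [ih]

-- ===== VERDICT (by name: the statement is the Claim_ definition above) =====
theorem generate_chat_summary_py_spec : Claim_equal_generate_chat_summary_py := by
  intro t _
  show generate_chat_summary_py t = generate_chat_summary_py_alt t
  by_cases ht : t = []
  · simp [generate_chat_summary_py, generate_chat_summary_py_alt, ht]
  · simp only [generate_chat_summary_py, generate_chat_summary_py_alt, if_neg ht]
    rw [pvStep_foldl, pvAgents_foldl, pvAppend_foldl_flatMap]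
    by_cases h : PySem.Set.update ([] : List String) (t.filterMap pvAgent?) = [] <;>
      (simp [h, pvFlatten_map_singleton, List.append_assoc]; try rfl)
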